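-- pv_equiv track=rewrite | github.com/GhabiX/ADI | src/ADI/cli.py | _build_tree_prefix
-- ===== SOURCE A (Python) =====
-- def _build_tree_prefix(call_graph, index, depth):
--     """Build the tree prefix (vertical lines) for given depth."""
--     if depth == 0:
--         return ""
--
--     prefix_parts = []
--     for d in range(depth):
--         # Check if there are more siblings at this depth level
--         has_more = False
--         for j in range(index + 1, len(call_graph)):
--             j_depth = call_graph[j].get('depth', 0)
--             if j_depth < d:
--                 break
--             if j_depth == d:
--                 has_more = True
--                 break
--         prefix_parts.append("|   " if has_more else "    ")
--
--     return "".join(prefix_parts)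
-- ===== SOURCE B (Python) =====
-- def _build_tree_prefix(call_graph, index, depth):
--     """Build the tree prefix (vertical lines) for given depth.
--
--     Single forward scan: a level d has more siblings iff d occurs as a strict
--     running minimum of the depths after `index`; collect those levels once,
--     then emit the prefix per level.
--     """
--     if depth <= 0:
--         return ""
--     marked = set()
--     m = None  # running minimum of depths seen so far (None = nothing yet)
--     for j in range(index + 1, len(call_graph)):
--         jd = call_graph[j].get('depth', 0)
--         if m is None or jd < m:
--             if 0 <= jd < depth:
--                 marked.add(jd)
--             m = jd
--             if m <= 0:
--                 break
--     return "".join("|   " if d in marked else "    " for d in range(depth))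
-- ===== Notes on version B (the rewrite author's own statement) =====
-- stated objective: alternative
-- what changed: Replaces A's rescan of the tail of call_graph for every level d in range(depth) by one forward scan that collects the strict running-minimum depths into a set (stopping once the minimum reaches 0), then emits the prefix per level by set membership.
import Mathlib
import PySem

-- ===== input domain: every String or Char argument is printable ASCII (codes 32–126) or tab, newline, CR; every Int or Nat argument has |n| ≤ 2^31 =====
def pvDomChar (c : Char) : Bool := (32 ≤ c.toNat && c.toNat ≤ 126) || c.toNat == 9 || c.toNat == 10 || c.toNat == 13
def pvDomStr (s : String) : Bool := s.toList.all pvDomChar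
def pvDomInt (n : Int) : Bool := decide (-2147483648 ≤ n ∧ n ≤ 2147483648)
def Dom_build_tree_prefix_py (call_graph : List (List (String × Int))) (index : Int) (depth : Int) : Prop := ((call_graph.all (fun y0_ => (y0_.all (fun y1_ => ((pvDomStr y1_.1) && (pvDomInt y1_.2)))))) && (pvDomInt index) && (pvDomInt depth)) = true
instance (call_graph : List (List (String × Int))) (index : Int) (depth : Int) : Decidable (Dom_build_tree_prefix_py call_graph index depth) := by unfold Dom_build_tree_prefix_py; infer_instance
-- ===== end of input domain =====

-- B replaces A's per-level rescans of the tail by ONE forward scan collecting the strict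
-- running-minimum depths into a set, then emits the prefix per level by set membership
-- (objective: alternative — a single-pass algorithm in place of per-level scans).

-- ===== PORT A =====
-- inner 'for j' loop of A: returns has_more for level d ('break' = return current answer)
def pvAInner (call_graph : List (List (String × Int))) (d : Int) : List Int → Bool
  | [] => false
  | j :: js =>
    match PySem.List.pyGet? call_graph j with
    | none => false  -- Python raises IndexError here; unreachable under Pre_
    | some row =>
      let j_depth := (PySem.Dict.mk row).getD "depth" 0
      if j_depth < d then false
      else if j_depth = d then true
      else pvAInner call_graph d js

def build_tree_prefix_py (call_graph : List (List (String × Int))) (index : Int) (depth : Int) : String :=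
  if depth = 0 then "" else
  let prefix_parts : List String :=
    (PySem.List.pyRange 0 depth 1).foldl
      (fun acc d =>
        let has_more := pvAInner call_graph d (PySem.List.pyRange (index + 1) (call_graph.length : Int) 1)
        acc ++ [if has_more then "|   " else "    "]) []
  PySem.Str.join "" prefix_parts

-- ===== PORT B =====
-- single forward scan: record each strict running-minimum depth that lies in [0, depth)
def pvBScan (call_graph : List (List (String × Int))) (depth : Int) :
    List Int → Option Int → PySem.Set Int → PySem.Set Int
  | [], _, marked => marked
  | j :: js, m, marked =>
    match PySem.List.pyGet? call_graph j with
    | none => marked  -- Python raises IndexError here; unreachable under Pre_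
    | some row =>
      let jd := (PySem.Dict.mk row).getD "depth" 0
      if (match m with | none => true | some mv => decide (jd < mv)) then
        let marked' := if 0 ≤ jd ∧ jd < depth then PySem.Set.add marked jd else marked
        if jd ≤ 0 then marked' else pvBScan call_graph depth js (some jd) marked'
      else pvBScan call_graph depth js m marked

def build_tree_prefix_py_alt (call_graph : List (List (String × Int))) (index : Int) (depth : Int) : String :=
  if depth ≤ 0 then "" else
  let marked := pvBScan call_graph depth (PySem.List.pyRange (index + 1) (call_graph.length : Int) 1) none PySem.Set.empty
  PySem.Str.join "" ((PySem.List.pyRange 0 depth 1).map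
    (fun d => if PySem.Set.contains marked d then "|   " else "    "))

-- ===== PRECONDITION & SPEC =====
-- Pre_ excludes exactly the inputs where A raises IndexError: depth ≥ 1 with index + 1 < -len(call_graph)
-- makes the first subscript call_graph[index+1] fall below the negative-wrap range (B raises there too).
def Pre_build_tree_prefix_py (call_graph : List (List (String × Int))) (index : Int) (depth : Int) : Prop :=
  depth ≤ 0 ∨ -(call_graph.length : Int) ≤ index + 1
instance (call_graph : List (List (String × Int))) (index : Int) (depth : Int) : Decidable (Pre_build_tree_prefix_py call_graph index depth) := by unfold Pre_build_tree_prefix_py; infer_instance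
def pvWitness_build_tree_prefix_py : (List (List (String × Int))) × Int × Int :=
  ([[("depth", 1)], [("depth", 1)], [("depth", 0)]], 0, 2)

def Spec_build_tree_prefix_py (call_graph : List (List (String × Int))) (index : Int) (depth : Int) (out : String) : Prop := out = build_tree_prefix_py_alt call_graph index depth
instance (call_graph : List (List (String × Int))) (index : Int) (depth : Int) (out : String) : Decidable (Spec_build_tree_prefix_py call_graph index depth out) := by unfold Spec_build_tree_prefix_py; infer_instance

-- ===== CLAIM (what is proved, stated in full; the proofs are below) =====
def Claim_equal_build_tree_prefix_py : Prop := ∀ (call_graph : List (List (String × Int))) (index : Int) (depth : Int), Dom_build_tree_prefix_py call_graph index depth → Pre_build_tree_prefix_py call_graph index depth → Spec_build_tree_prefix_py call_graph index depth (build_tree_prefix_py call_graph index depth)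

-- ===== LEMMAS AND PROOFS =====

-- "d is below the running minimum m" (m = none means no element seen yet)
def pvBelow (d : Int) : Option Int → Bool
  | none => true
  | some mv => decide (d < mv)

theorem pv_scan_correct (call_graph : List (List (String × Int))) (depth : Int)
    (js : List Int) (m : Option Int) (S : PySem.Set Int)
    (h : ∀ j ∈ js, (PySem.List.pyGet? call_graph j).isSome)
    (d : Int) (hd0 : 0 ≤ d) (hdd : d < depth) :
    (d ∈ pvBScan call_graph depth js m S) ↔
      (if pvBelow d m then (d ∈ S ∨ pvAInner call_graph d js = true)
       else d ∈ S) := by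
  induction js generalizing m S with
  | nil => cases m <;> simp [pvBScan, pvAInner, pvBelow]
  | cons j js ih =>
    obtain ⟨row, hrow⟩ := Option.isSome_iff_exists.mp (h j (by simp))
    have h' : ∀ x ∈ js, (PySem.List.pyGet? call_graph x).isSome :=
      fun x hx => h x (List.mem_cons_of_mem _ hx)
    have IH := fun m S => ih m S h'
    simp only [pvBScan, pvAInner, hrow]
    set jd := (PySem.Dict.mk row).getD "depth" 0 with hjd
    clear hjd hrow h ih h'
    rcases m with _ | mv <;>
      simp only [pvBelow, decide_eq_true_eq, if_true] <;>
      rcases lt_trichotomy d jd with hdj | hdj | hdj <;>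
      by_cases h1 : jd ≤ 0 <;>
      by_cases h2 : 0 ≤ jd ∧ jd < depth <;>
      first
        | (-- mv present: also split on jd < mv and d < mv
           by_cases hm : jd < mv <;> by_cases hm2 : d < mv <;>
           simp only [hm, hm2, if_true, if_false, h1, h2, IH, pvBelow,
             decide_eq_true_eq] <;>
           first
             | (exfalso; omega)
             | (intros; exfalso; omega)
             | (simp_all [show d ≤ jd from le_of_lt hdj, show jd ≠ d from by omega,
                  show d ≠ jd from by omega])
             | (subst hdj; simp_all)
             | (simp_all [show ¬ d < jd from by omega,
                  show d ≠ jd from by omega])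
             | simp_all
             | omega)
        | (simp only [h1, h2, if_true, if_false, IH, pvBelow, decide_eq_true_eq] <;>
           first
             | (exfalso; omega)
             | (intros; exfalso; omega)
             | (simp_all [show d ≤ jd from le_of_lt hdj, show jd ≠ d from by omega,
                  show d ≠ jd from by omega])
             | (subst hdj; simp_all)
             | (simp_all [show ¬ d < jd from by omega,
                  show d ≠ jd from by omega])
             | simp_all
             | omega)

theorem pv_foldl_append_map {α β : Type} (g : α → β) (l : List α) (init : List β) :
    l.foldl (fun acc d => acc ++ [g d]) init = init ++ l.map g := by
  induction l generalizing init with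
  | nil => simp
  | cons x xs ih => simp [ih]

-- ===== VERDICT (by name: the statement is the Claim_ definition above) =====
theorem build_tree_prefix_py_spec : Claim_equal_build_tree_prefix_py := by
  intro cg index depth _ hpre
  show build_tree_prefix_py cg index depth = build_tree_prefix_py_alt cg index depth
  have hpre' : depth ≤ 0 ∨ -(cg.length : Int) ≤ index + 1 := hpre
  simp only [build_tree_prefix_py, build_tree_prefix_py_alt]
  by_cases h0 : depth ≤ 0
  · have hnil : PySem.List.pyRange 0 depth 1 = [] := PySem.List.pyRange_one_eq_nil h0
    rw [if_pos h0]
    rcases eq_or_lt_of_le h0 with heq | hlt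
    · simp [← heq, hnil, PySem.Str.join]
    · rw [if_neg (by omega), hnil]
      simp [PySem.Str.join]
  · rw [if_neg (by omega), if_neg h0]
    have hsome : ∀ j ∈ PySem.List.pyRange (index + 1) (cg.length : Int) 1,
        (PySem.List.pyGet? cg j).isSome := by
      intro j hj
      rw [PySem.List.mem_pyRange_one] at hj
      have hx : -(cg.length : Int) ≤ index + 1 := by
        rcases hpre' with hp | hp
        · omega
        · exact hp
      rw [Option.isSome_iff_ne_none, Ne, PySem.List.pyGet?_eq_none_iff]
      intro hc
      exact hc ⟨by omega, hj.2⟩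
    rw [pv_foldl_append_map, List.nil_append]
    congr 1
    apply List.map_congr_left
    intro d hd
    rw [PySem.List.mem_pyRange_one] at hd
    have hc := pv_scan_correct cg depth
      (PySem.List.pyRange (index + 1) (cg.length : Int) 1) none PySem.Set.empty
      hsome d hd.1 hd.2
    simp only [pvBelow, if_true] at hc
    by_cases hA : pvAInner cg d (PySem.List.pyRange (index + 1) (cg.length : Int) 1) = true
    · have hmem : d ∈ pvBScan cg depth
          (PySem.List.pyRange (index + 1) (cg.length : Int) 1) none PySem.Set.empty :=
        hc.mpr (Or.inr hA)
      simp [hA]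
      simpa [PySem.Set.empty] using hmem
    · have hmem : d ∉ pvBScan cg depth
          (PySem.List.pyRange (index + 1) (cg.length : Int) 1) none PySem.Set.empty :=
        fun hm => hA ((hc.mp hm).resolve_left (by simp [PySem.Set.empty]))
      simp [hA]
      simpa [PySem.Set.empty] using hmem
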